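-- pv_equiv track=rewrite | github.com/microsoft/DeepSpeed | tests/unit/runtime/utils/test_partition.py | get_partition_weights
-- ===== SOURCE A (Python) =====
-- def get_partition_weights(weights, parts):
--     """ Return the amount of weight in each partition. """
--     costs = [0] * (len(parts) - 1)
--     P = len(parts) - 1
--     for p in range(P):
--         start = parts[p]
--         stop = parts[p + 1]
--         costs[p] = sum(weights[start:stop])
--     return costs
-- ===== SOURCE B (Python) =====
-- def get_partition_weights(weights, parts):
--     """ Return the amount of weight in each partition. """
--     n = len(weights)
--     prefix = [0]
--     acc = 0
--     for w in weights:
--         acc += w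
--         prefix.append(acc)
--
--     def norm(i):
--         if i < 0:
--             i += n
--         if i < 0:
--             return 0
--         if i > n:
--             return n
--         return i
--
--     costs = []
--     for p in range(len(parts) - 1):
--         a = norm(parts[p])
--         b = norm(parts[p + 1])
--         costs.append(prefix[b] - prefix[a] if a < b else 0)
--     return costs
-- ===== Notes on version B (the rewrite author's own statement) =====
-- stated objective: faster
-- what changed: Replaces the per-partition slice-and-sum with a prefix-sum table built in one pass; each partition cost becomes a difference of two prefix sums at the slice-resolved boundaries.
import Mathlib
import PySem

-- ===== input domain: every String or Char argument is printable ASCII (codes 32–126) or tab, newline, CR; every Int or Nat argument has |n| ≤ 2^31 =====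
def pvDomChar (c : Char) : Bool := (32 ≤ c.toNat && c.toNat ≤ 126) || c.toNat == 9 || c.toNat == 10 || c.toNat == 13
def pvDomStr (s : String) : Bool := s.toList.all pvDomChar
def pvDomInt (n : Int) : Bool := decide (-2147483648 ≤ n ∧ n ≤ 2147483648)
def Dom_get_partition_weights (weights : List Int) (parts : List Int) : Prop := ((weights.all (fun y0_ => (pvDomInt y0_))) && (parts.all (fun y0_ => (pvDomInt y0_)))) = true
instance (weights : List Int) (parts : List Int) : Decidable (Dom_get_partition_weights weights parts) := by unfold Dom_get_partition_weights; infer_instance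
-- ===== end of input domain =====

-- B replaces A's per-partition slice-and-sum (O(P·n)) by a prefix-sum table built in one
-- pass, each cost being a difference of two prefix sums at the slice-resolved boundaries.

-- ===== PORT A =====
def get_partition_weights (weights : List Int) (parts : List Int) : List Int :=
  -- costs = [0] * (len(parts) - 1);  P = len(parts) - 1
  let costs : List Int := List.replicate (((parts.length : Int) - 1).toNat) 0
  let P : Int := (parts.length : Int) - 1
  -- for p in range(P): costs[p] = sum(weights[parts[p]:parts[p+1]])
  (PySem.List.pyRange 0 P 1).foldl (fun costs p =>
    let start := PySem.List.pyGetD parts p 0        -- in range for every p of the loop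
    let stop  := PySem.List.pyGetD parts (p + 1) 0
    PySem.List.pySetD costs p (PySem.List.slice weights (some start) (some stop)).sum) costs

-- ===== PORT B =====
-- norm(i): Python's slice-boundary resolution of index i for a list of length n
def pvNorm (n : Nat) (i : Int) : Nat :=
  let i' : Int := if i < 0 then i + n else i
  if i' < 0 then 0 else if (n : Int) < i' then n else i'.toNat

def get_partition_weights_alt (weights : List Int) (parts : List Int) : List Int :=
  let n := weights.length
  -- prefix = [0]; acc = 0; for w in weights: acc += w; prefix.append(acc)
  let pre := (weights.foldl (fun st w => (st.1 ++ [st.2 + w], st.2 + w))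
              (([0] : List Int), (0 : Int))).1
  -- for p in range(len(parts)-1): a,b = norm(parts[p]), norm(parts[p+1]); append diff or 0
  (List.range (parts.length - 1)).foldl (fun costs p =>
    let a := pvNorm n (parts.getD p 0)
    let b := pvNorm n (parts.getD (p + 1) 0)
    costs ++ [if a < b then pre.getD b 0 - pre.getD a 0 else 0]) []

-- ===== PRECONDITION & SPEC =====
def Spec_get_partition_weights (weights : List Int) (parts : List Int) (out : List Int) : Prop := out = get_partition_weights_alt weights parts
instance (weights : List Int) (parts : List Int) (out : List Int) : Decidable (Spec_get_partition_weights weights parts out) := by unfold Spec_get_partition_weights; infer_instance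

-- ===== CLAIM (what is proved, stated in full; the proofs are below) =====
def Claim_equal_get_partition_weights : Prop := ∀ (weights : List Int) (parts : List Int), Dom_get_partition_weights weights parts → Spec_get_partition_weights weights parts (get_partition_weights weights parts)

-- ===== LEMMAS AND PROOFS =====

theorem pvNorm_eq_clampIdx (n : Nat) (i : Int) : pvNorm n i = PySem.List.clampIdx n i := by
  simp only [pvNorm, PySem.List.clampIdx]
  split_ifs <;> omega

-- the list of running sums starting from s
def pvPrefix (s : Int) : List Int → List Int
  | [] => []
  | w :: ws => (s + w) :: pvPrefix (s + w) ws

theorem foldl_pre (ws : List Int) (p : List Int) (s : Int) :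
    (ws.foldl (fun st w => (st.1 ++ [st.2 + w], st.2 + w)) (p, s)).1 = p ++ pvPrefix s ws := by
  induction ws generalizing p s with
  | nil => simp [pvPrefix]
  | cons w ws ih => simp [pvPrefix, ih, List.append_assoc]

theorem pvPrefix_getD (ws : List Int) (s : Int) (k : Nat) (hk : k < ws.length) :
    (pvPrefix s ws).getD k 0 = s + (ws.take (k + 1)).sum := by
  induction ws generalizing s k with
  | nil => simp at hk
  | cons w ws ih =>
    cases k with
    | zero => simp [pvPrefix]
    | succ j =>
      simp only [pvPrefix, List.getD_cons_succ, List.take_succ_cons, List.sum_cons]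
      rw [ih _ j (by simpa using hk)]
      ring

theorem pre_getD (ws : List Int) (k : Nat) (hk : k ≤ ws.length) :
    (([0] : List Int) ++ pvPrefix 0 ws).getD k 0 = (ws.take k).sum := by
  cases k with
  | zero => simp
  | succ j =>
    simpa using pvPrefix_getD ws 0 j (by omega)

theorem sum_drop_take (xs : List Int) (a b : Nat) (hab : a ≤ b) :
    (((xs.drop a).take (b - a)).sum : Int) = (xs.take b).sum - (xs.take a).sum := by
  have h : xs.take b = xs.take a ++ (xs.drop a).take (b - a) := by
    rw [← List.take_add]
    congr 1
    omega
  rw [h, List.sum_append]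
  ring

-- folding index-wise set over range n on a list of length ≥ n writes f at each index
theorem setfold (n : Nat) (f : Nat → Int) (l : List Int) (hn : n ≤ l.length) :
    (List.range n).foldl (fun c p => c.set p (f p)) l = (List.range n).map f ++ l.drop n := by
  induction n with
  | zero => simp
  | succ m ih =>
    rw [List.range_succ, List.foldl_append, ih (by omega)]
    have hm : m < l.length := by omega
    simp only [List.foldl_cons, List.foldl_nil, List.map_append]
    rw [List.set_append_right _ _ (by simp)]
    simp only [List.length_map, List.length_range, Nat.sub_self, List.map_cons, List.map_nil]
    rw [List.drop_eq_getElem_cons hm, List.set_cons_zero]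
    simp [List.append_assoc]

theorem get_partition_weights_spec' (weights parts : List Int) :
    get_partition_weights weights parts = get_partition_weights_alt weights parts := by
  unfold get_partition_weights get_partition_weights_alt
  dsimp only
  set n := weights.length with hn
  set Pn := parts.length - 1 with hP
  -- A's range and initial list expressed over Nat
  rw [PySem.List.pyRange_one]
  have hPt : ((parts.length : Int) - 1 - 0).toNat = Pn := by omega
  rw [hPt, List.foldl_map]
  have hrep : (((parts.length : Int) - 1).toNat) = Pn := by omega
  rw [hrep]
  have hA : ∀ (c : List Int) (k : Nat),
      (fun (costs : List Int) (p : Int) =>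
        PySem.List.pySetD costs p
          (PySem.List.slice weights (some (PySem.List.pyGetD parts p 0))
            (some (PySem.List.pyGetD parts (p + 1) 0))).sum) c ((0 : Int) + k)
      = c.set k ((PySem.List.slice weights (some (parts.getD k 0))
            (some (parts.getD (k + 1) 0))).sum) := by
    intro c k
    have h2 : ((0 : Int) + k + 1) = ((k + 1 : Nat) : Int) := by push_cast; ring
    have h1 : ((0 : Int) + k) = ((k : Nat) : Int) := by ring
    dsimp only
    rw [h2, h1, PySem.List.pyGetD_natCast, PySem.List.pyGetD_natCast, PySem.List.pySetD_natCast]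
  simp only [hA]
  rw [setfold Pn _ _ (by simp)]
  rw [PySem.List.foldl_append_singleton_eq_map]
  simp only [List.drop_replicate, List.nil_append]
  have hdrop : Pn - Pn = 0 := by omega
  rw [hdrop]
  simp only [List.replicate_zero, List.append_nil]
  apply List.map_congr_left
  intro k hk
  have hk' : k < Pn := List.mem_range.mp hk
  -- boundaries
  rw [foldl_pre]
  set a := pvNorm n (parts.getD k 0) with ha
  set b := pvNorm n (parts.getD (k + 1) 0) with hb
  have han : a ≤ n := by rw [ha]; simp only [pvNorm]; split_ifs <;> omega
  have hbn : b ≤ n := by rw [hb]; simp only [pvNorm]; split_ifs <;> omega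
  have hslice : PySem.List.slice weights (some (parts.getD k 0)) (some (parts.getD (k + 1) 0))
      = (weights.drop a).take (b - a) := by
    simp only [PySem.List.slice, ha, hb, pvNorm_eq_clampIdx, hn]
  rw [hslice, pre_getD _ a han, pre_getD _ b hbn]
  by_cases hab : a < b
  · rw [if_pos hab, sum_drop_take weights a b (by omega)]
  · rw [if_neg hab]
    have : b - a = 0 := by omega
    rw [this]
    simp

-- ===== VERDICT (by name: the statement is the Claim_ definition above) =====
theorem get_partition_weights_spec : Claim_equal_get_partition_weights := by
  intro weights parts _
  exact get_partition_weights_spec' weights parts
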